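-- pv_equiv track=rewrite | github.com/harmslab/epistasis | epistasis/core/utils.py | generate_binary_space
-- ===== SOURCE A (Python) =====
-- import itertools as it
--
-- def generate_binary_space(wildtype, mutant):
--     """ Generate binary genotype space between two sequences (that should differ at all sites) """
--     if len(wildtype) != len(mutant):
--         raise IndexError("ancestor_sequence and derived sequence must be the same length.")
--
--     binaries = sorted(["".join(list(s)) for s in it.product('01', repeat=len(wildtype))])
--     sequence_space = list()
--     for b in binaries:
--         binary = list(b)
--         sequence = list()
--         for i in range(len(wildtype)):
--             if b[i] == '0':
--                 sequence.append(wildtype[i])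
--             else:
--                 sequence.append(mutant[i])
--         sequence_space.append(''.join(sequence))
--     return sequence_space
-- ===== SOURCE B (Python) =====
-- import itertools as it
--
-- def generate_binary_space(wildtype, mutant):
--     """ Generate binary genotype space between two sequences (that should differ at all sites) """
--     if len(wildtype) != len(mutant):
--         raise IndexError("ancestor_sequence and derived sequence must be the same length.")
--     return [''.join(combo) for combo in it.product(*zip(wildtype, mutant))]
-- ===== Notes on version B (the rewrite author's own statement) =====
-- stated objective: simpler
-- what changed: B drops the binary-string intermediate, the sort and the inner index loop: it takes the cartesian product of the per-position (wildtype, mutant) character pairs directly, whose natural order already equals A's sorted binary order.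
import Mathlib
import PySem

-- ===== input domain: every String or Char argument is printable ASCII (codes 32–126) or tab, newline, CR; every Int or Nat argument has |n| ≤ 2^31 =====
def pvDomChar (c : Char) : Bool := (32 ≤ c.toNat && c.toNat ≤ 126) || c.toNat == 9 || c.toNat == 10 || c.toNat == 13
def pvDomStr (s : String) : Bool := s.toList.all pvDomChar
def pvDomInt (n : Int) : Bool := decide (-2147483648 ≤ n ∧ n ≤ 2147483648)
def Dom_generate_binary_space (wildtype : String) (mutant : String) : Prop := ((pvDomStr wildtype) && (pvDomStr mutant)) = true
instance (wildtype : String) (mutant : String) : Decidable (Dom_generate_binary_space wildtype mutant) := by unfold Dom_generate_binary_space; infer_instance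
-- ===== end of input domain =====

-- B replaces A's binary-string intermediate, its sort and its inner index loop by a direct
-- cartesian product over the per-position (wildtype, mutant) character pairs (objective: simpler).


-- ===== PORT A =====
-- it.product('01', repeat=n): tuples in itertools order (first position varies slowest)
def pvProd01 : Nat → List (List Char)
  | 0 => [[]]
  | n+1 => ['0','1'].flatMap (fun c => (pvProd01 n).map (fun t => c :: t))

def generate_binary_space (wildtype : String) (mutant : String) : List String :=
  if PySem.Str.len wildtype ≠ PySem.Str.len mutant then []  -- Python raises IndexError here; excluded by Pre_
  else
    let binaries := PySem.List.sorted ((pvProd01 wildtype.toList.length).map String.ofList) (fun b => b) false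
    -- for b in binaries: inner loop over range(len(wildtype)); b[i] and wildtype[i] are always
    -- in range here (all binaries have length len(wildtype) = len(mutant)), so getD is exact
    binaries.map (fun b =>
      String.ofList ((List.range wildtype.toList.length).map (fun i =>
        if b.toList.getD i ' ' = '0' then wildtype.toList.getD i ' ' else mutant.toList.getD i ' ')))

-- ===== PORT B =====
-- it.product(*zip(wildtype, mutant)): pick one char of each pair, first pair varies slowest
def pvChoices : List (Char × Char) → List (List Char)
  | [] => [[]]
  | p :: rest => [p.1, p.2].flatMap (fun c => (pvChoices rest).map (fun t => c :: t))

def generate_binary_space_alt (wildtype : String) (mutant : String) : List String :=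
  if PySem.Str.len wildtype ≠ PySem.Str.len mutant then []  -- Python raises IndexError here; excluded by Pre_
  else (pvChoices (wildtype.toList.zip mutant.toList)).map String.ofList

-- ===== PRECONDITION & SPEC =====
-- A (and B) raise IndexError when the two sequences have different lengths; Pre_ excludes exactly those.
def Pre_generate_binary_space (wildtype : String) (mutant : String) : Prop :=
  PySem.Str.len wildtype = PySem.Str.len mutant
instance (wildtype : String) (mutant : String) : Decidable (Pre_generate_binary_space wildtype mutant) := by unfold Pre_generate_binary_space; infer_instance
def pvWitness_generate_binary_space : String × String := ("ab", "AB")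

def Spec_generate_binary_space (wildtype : String) (mutant : String) (out : List String) : Prop := out = generate_binary_space_alt wildtype mutant
instance (wildtype : String) (mutant : String) (out : List String) : Decidable (Spec_generate_binary_space wildtype mutant out) := by unfold Spec_generate_binary_space; infer_instance

-- ===== CLAIM (what is proved, stated in full; the proofs are below) =====
def Claim_equal_generate_binary_space : Prop := ∀ (wildtype : String) (mutant : String), Dom_generate_binary_space wildtype mutant → Pre_generate_binary_space wildtype mutant → Spec_generate_binary_space wildtype mutant (generate_binary_space wildtype mutant)

-- ===== LEMMAS AND PROOFS =====

-- pvProd01 n is strictly increasing in the string order, so Python's sort leaves it unchanged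
theorem pvProd01_pairwise (n : Nat) : ((pvProd01 n).map String.ofList).Pairwise (· < ·) := by
  induction n with
  | zero => simp [pvProd01]
  | succ n ih =>
    have hcons : ∀ c : Char, ((pvProd01 n).map (fun t => String.ofList (c :: t))).Pairwise (· < ·) := by
      intro c
      have hp : ((pvProd01 n).map String.ofList).Pairwise
          (fun a b => String.ofList (c :: a.toList) < String.ofList (c :: b.toList)) := by
        refine ih.imp ?_
        intro a b hab
        rw [String.lt_iff_toList_lt] at *
        simp only [String.toList_ofList]
        exact List.Lex.cons hab
      have h2 := (List.pairwise_map (f := fun s : String => String.ofList (c :: s.toList))).mpr hp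
      rw [List.map_map] at h2
      have hfun : ((fun s : String => String.ofList (c :: s.toList)) ∘ String.ofList)
          = (fun t => String.ofList (c :: t)) := by funext t; simp
      rwa [hfun] at h2
    simp only [pvProd01, List.flatMap_cons, List.flatMap_nil, List.append_nil, List.map_append,
      List.map_map]
    refine List.pairwise_append.mpr ⟨?_, ?_, ?_⟩
    · simpa [Function.comp] using hcons '0'
    · simpa [Function.comp] using hcons '1'
    · intro a ha b hb
      simp only [List.mem_map, Function.comp] at ha hb
      obtain ⟨s, _, rfl⟩ := ha
      obtain ⟨t, _, rfl⟩ := hb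
      rw [String.lt_iff_toList_lt]
      simp only [String.toList_ofList]
      exact List.Lex.rel (by decide)

-- decoding the tuples of pvProd01 positionally equals the cartesian product of the char pairs
theorem pvDecode_eq (W M : List Char) (h : W.length = M.length) :
    (pvProd01 W.length).map (fun t => (List.range W.length).map (fun i =>
        if t.getD i ' ' = '0' then W.getD i ' ' else M.getD i ' '))
      = pvChoices (W.zip M) := by
  induction W generalizing M with
  | nil => cases M with
    | nil => simp [pvProd01, pvChoices]
    | cons m M => simp at h
  | cons w W ih =>
    cases M with
    | nil => simp at h
    | cons m M =>
      simp only [List.length_cons] at h ⊢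
      have h' : W.length = M.length := by omega
      simp only [pvProd01, pvChoices, List.zip_cons_cons, List.flatMap_cons, List.flatMap_nil,
        List.append_nil, List.map_append, List.map_map]
      have hstep : ∀ c : Char,
          (pvProd01 W.length).map ((fun t => (List.range (W.length + 1)).map (fun i =>
              if t.getD i ' ' = '0' then (w :: W).getD i ' ' else (m :: M).getD i ' '))
            ∘ (fun t => c :: t))
          = ((pvChoices (W.zip M)).map (fun t => (if c = '0' then w else m) :: t)) := by
        intro c
        rw [← ih M h']
        simp only [List.map_map]
        refine List.map_congr_left ?_
        intro t _
        simp only [Function.comp, List.range_succ_eq_map, List.map_cons, List.map_map]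
        congr 1
      rw [hstep '0', hstep '1']
      simp

theorem generate_binary_space_spec : Claim_equal_generate_binary_space := by
  intro wildtype mutant _ hpre
  unfold Pre_generate_binary_space at hpre
  have hlen : wildtype.toList.length = mutant.toList.length := by
    have := hpre; rw [PySem.Str.len_eq, PySem.Str.len_eq] at this; exact_mod_cast this
  unfold Spec_generate_binary_space generate_binary_space generate_binary_space_alt
  rw [if_neg (not_not_intro hpre), if_neg (not_not_intro hpre)]
  have hsorted : PySem.List.sorted ((pvProd01 wildtype.toList.length).map String.ofList)
      (fun b => b) false = (pvProd01 wildtype.toList.length).map String.ofList :=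
    PySem.List.sorted_eq_self_of_pairwise _ _ ((pvProd01_pairwise _).imp le_of_lt)
  rw [hsorted, List.map_map, ← pvDecode_eq wildtype.toList mutant.toList hlen, List.map_map]
  refine List.map_congr_left ?_
  intro t _
  simp [Function.comp]
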